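-- pv_equiv track=rewrite | github.com/obsqyr/TFYA92-group-A | test_make_mongodb.py | anynomize_two_symbols
-- ===== SOURCE A (Python) =====
-- from string import ascii_uppercase, ascii_lowercase
--
-- def anynomize_two_symbols(el_num_list):
--     # putting in "#"" to mark the end of string "ABCD..Z#"
--     uppercase = ascii_uppercase + "#"
--     # Making codeing Aa, Ba, Ca,.. Za, Ab, Bb,...Zb etc.
--     ii = -1
--     for second in ascii_lowercase:
--         if ii == len(el_num_list):
--             break
--         for first in uppercase:
--             ii += 1
--             if first == "#": # symbol after Zx where x is a-z
--                 ii = ii - 1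
--                 break
--             elif ii == len(el_num_list):
--                 break
--             el_num = el_num_list[ii]
--             if el_num == str(1):
--                 el_num = ""
--                 yield first + second + el_num
--             else:
--                 yield first + second + el_num
-- ===== SOURCE B (Python) =====
-- from string import ascii_uppercase, ascii_lowercase
--
-- def anynomize_two_symbols(el_num_list):
--     for ii, el_num in enumerate(el_num_list):
--         if ii == 676:
--             break
--         first = ascii_uppercase[ii % 26]
--         second = ascii_lowercase[ii // 26]
--         yield first + second + ("" if el_num == str(1) else el_num)
-- ===== Notes on version B (the rewrite author's own statement) =====
-- stated objective: simpler
-- what changed: Replaces the nested letter loops with the '#' sentinel and hand-maintained ii counter by a single enumerate pass that computes both code letters in closed form (ii % 26, ii // 26) and breaks at 676.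
import Mathlib
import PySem

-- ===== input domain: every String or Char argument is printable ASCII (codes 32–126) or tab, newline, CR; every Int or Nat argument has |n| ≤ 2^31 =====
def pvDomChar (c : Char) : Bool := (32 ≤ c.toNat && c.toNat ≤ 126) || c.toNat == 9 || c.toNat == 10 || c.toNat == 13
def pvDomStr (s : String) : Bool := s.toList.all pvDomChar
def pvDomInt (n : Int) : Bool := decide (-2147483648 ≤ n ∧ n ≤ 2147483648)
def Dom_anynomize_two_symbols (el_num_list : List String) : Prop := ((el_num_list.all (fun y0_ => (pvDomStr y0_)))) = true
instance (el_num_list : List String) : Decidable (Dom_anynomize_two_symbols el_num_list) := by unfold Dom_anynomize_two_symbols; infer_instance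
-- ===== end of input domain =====

-- B replaces A's nested letter loops ('#' sentinel, hand-maintained ii counter) by one
-- enumerate pass computing both code letters in closed form (ii % 26, ii // 26); same values, same cost.

-- ===== PORT A =====
def pvUpperHash : List Char := "ABCDEFGHIJKLMNOPQRSTUVWXYZ#".toList
def pvLowers : List Char := "abcdefghijklmnopqrstuvwxyz".toList

-- inner 'for first in uppercase' loop: state (ii, acc), returns them on break / exhaustion
def pvInner (xs : List String) (second : Char) : List Char → Int → List String → Int × List String
  | [], ii, acc => (ii, acc)
  | first :: rest, ii0, acc =>
    let ii := ii0 + 1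
    if first = '#' then (ii - 1, acc)
    else if ii = (xs.length : Int) then (ii, acc)
    else
      -- el_num_list[ii]: exact — whenever this branch runs, 0 ≤ ii < len (proved in the lemmas)
      let el := (PySem.List.pyGet? xs ii).getD ""
      let el := if el = "1" then "" else el
      pvInner xs second rest ii (acc ++ [String.mk [first, second] ++ el])

-- outer 'for second in ascii_lowercase' loop
def pvOuter (xs : List String) : List Char → Int → List String → List String
  | [], _, acc => acc
  | second :: rest, ii, acc =>
    if ii = (xs.length : Int) then acc
    else
      let r := pvInner xs second pvUpperHash ii acc
      pvOuter xs rest r.1 r.2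

def anynomize_two_symbols (el_num_list : List String) : List String :=
  pvOuter el_num_list pvLowers (-1) []

-- ===== PORT B =====
def pvUppers : String := "ABCDEFGHIJKLMNOPQRSTUVWXYZ"
def pvLowersS : String := "abcdefghijklmnopqrstuvwxyz"

-- the single 'for ii, el_num in enumerate(...)' loop of Source B
def pvAltGo : List (Int × String) → List String
  | [] => []
  | (ii, el) :: rest =>
    if ii = 676 then []
    else
      -- ascii_uppercase[ii % 26] / ascii_lowercase[ii // 26]: exact — index is in range here
      let first := (PySem.Str.pyGet? pvUppers (PySem.Int.mod ii 26)).getD 'A'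
      let second := (PySem.Str.pyGet? pvLowersS (PySem.Int.floordiv ii 26)).getD 'a'
      (String.mk [first, second] ++ (if el = "1" then "" else el)) :: pvAltGo rest

def anynomize_two_symbols_alt (el_num_list : List String) : List String :=
  pvAltGo (PySem.List.enumerate el_num_list 0)

-- ===== PRECONDITION & SPEC =====
def Spec_anynomize_two_symbols (el_num_list : List String) (out : List String) : Prop := out = anynomize_two_symbols_alt el_num_list
instance (el_num_list : List String) (out : List String) : Decidable (Spec_anynomize_two_symbols el_num_list out) := by unfold Spec_anynomize_two_symbols; infer_instance

-- ===== CLAIM (what is proved, stated in full; the proofs are below) =====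
def Claim_equal_anynomize_two_symbols : Prop := ∀ (el_num_list : List String), Dom_anynomize_two_symbols el_num_list → Spec_anynomize_two_symbols el_num_list (anynomize_two_symbols el_num_list)

-- ===== LEMMAS AND PROOFS =====

-- common specification: the code string for index i
def pvCode (i : Nat) : String :=
  String.mk [pvUppers.toList.getD (i % 26) 'A', pvLowersS.toList.getD (i / 26) 'a']

def pvG (xs : List String) (i : Nat) : String :=
  pvCode i ++ (if (xs[i]?.getD "") = "1" then "" else (xs[i]?.getD ""))

-- structural spec: anonymize l whose first element has index j
def pvSpecFrom (j : Nat) : List String → List String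
  | [] => []
  | x :: l => if j = 676 then [] else
      (pvCode j ++ (if x = "1" then "" else x)) :: pvSpecFrom (j+1) l

lemma pvSpecFrom_eq (l : List String) : ∀ j : Nat, j ≤ 676 →
    pvSpecFrom j l = (List.range (min l.length (676 - j))).map (fun t =>
      pvCode (j+t) ++ (if (l[t]?.getD "") = "1" then "" else (l[t]?.getD ""))) := by
  induction l with
  | nil =>
    intro j _
    have : min ([] : List String).length (676 - j) = 0 := by simp
    rw [this]
    simp [pvSpecFrom]
  | cons x l ih =>
    intro j hj
    simp only [pvSpecFrom]
    by_cases h : j = 676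
    · rw [if_pos h]
      have h0 : min (x :: l).length (676 - j) = 0 := by omega
      rw [h0]
      simp
    · rw [if_neg h, ih (j+1) (by omega)]
      have h1 : min (x :: l).length (676 - j) = (min l.length (676 - (j+1))) + 1 := by
        simp only [List.length_cons]; omega
      rw [h1, List.range_succ_eq_map, List.map_cons, List.map_map]
      refine List.cons_eq_cons.mpr ⟨?_, ?_⟩
      · simp
      · apply List.map_congr_left
        intro t _
        simp only [Function.comp, Nat.succ_eq_add_one]
        have h3 : j + (t + 1) = j + 1 + t := by omega
        rw [h3]
        simp

-- ---- B side ----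
lemma pvAltGo_enumerate (l : List String) : ∀ j : Nat,
    pvAltGo (PySem.List.enumerate l (j : Int)) = pvSpecFrom j l := by
  induction l with
  | nil => intro j; simp [PySem.List.enumerate_nil, pvAltGo, pvSpecFrom]
  | cons x l ih =>
    intro j
    rw [PySem.List.enumerate_cons]
    simp only [pvAltGo, pvSpecFrom]
    by_cases h : j = 676
    · subst h; norm_num
    · rw [if_neg (by exact_mod_cast h), if_neg h]
      have hj1 : ((j : Int) + 1) = ((j + 1 : Nat) : Int) := by push_cast; ring
      rw [hj1, ih (j+1)]
      congr 1
      have hmod : PySem.Int.mod ((j:Nat):Int) 26 = ((j % 26 : Nat) : Int) := by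
        exact_mod_cast PySem.Int.mod_natCast j 26
      have hdiv : PySem.Int.floordiv ((j:Nat):Int) 26 = ((j / 26 : Nat) : Int) := by
        exact_mod_cast PySem.Int.floordiv_natCast j 26
      rw [hmod, hdiv, PySem.Str.pyGet?_natCast, PySem.Str.pyGet?_natCast]
      simp only [pvCode, List.getD_eq_getElem?_getD]

lemma pvAlt_eq_spec (xs : List String) : anynomize_two_symbols_alt xs = pvSpecFrom 0 xs := by
  have := pvAltGo_enumerate xs 0
  simpa [anynomize_two_symbols_alt] using this

-- ---- A side ----
lemma pvHash_not_mem_upper : '#' ∉ pvUppers.toList := by decide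

lemma pvUpperHash_eq : pvUpperHash = pvUppers.toList ++ ['#'] := by decide

-- inner loop: starting at ii = base+m-1 with the suffix of letters from position m,
-- under base = 26*k, it yields exactly indices base+m .. min(len, base+26)-1
lemma pvInner_spec (xs : List String) (k : Nat) (hk : k < 26) :
    ∀ r : Nat, r ≤ 26 → ∀ acc : List String, 26*k + (26 - r) ≤ xs.length →
    pvInner xs (pvLowers.getD k 'a') (List.drop (26 - r) pvUppers.toList ++ ['#'])
      ((26*k + (26 - r) : Nat) - 1 : Int) acc =
    ((if xs.length < 26*k + 26 then (xs.length : Int) else (26*k + 25 : Nat)),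
     acc ++ (List.range (min r (xs.length - (26*k + (26 - r))))).map
        (fun t => pvG xs (26*k + (26 - r) + t))) := by
  intro r
  induction r with
  | zero =>
    intro _ acc hle
    have hd : List.drop (26 - 0) pvUppers.toList = [] := by decide
    rw [hd, List.nil_append]
    simp only [pvInner, if_true]
    have h1 : ¬ xs.length < 26*k + 26 := by omega
    rw [if_neg h1]
    refine congr_arg₂ Prod.mk ?_ ?_
    · push_cast; omega
    · simp
  | succ r ih =>
    intro hr acc hle
    set m : Nat := 26 - (r+1) with hm
    have hmlt : m < 26 := by omega
    have hdrop : List.drop m pvUppers.toList =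
        pvUppers.toList[m]'(by simp [pvUppers]; omega) :: List.drop (m+1) pvUppers.toList := by
      exact (List.getElem_cons_drop _).symm
    rw [hdrop]
    simp only [List.cons_append, pvInner]
    have hfirst_ne : ¬ pvUppers.toList[m]'(by simp [pvUppers]; omega) = '#' := by
      intro h; exact pvHash_not_mem_upper (h ▸ List.getElem_mem _)
    rw [if_neg hfirst_ne]
    have harith : ((26*k + m : Nat) - 1 : Int) + 1 = ((26*k + m : Nat) : Int) := by omega
    rw [harith]
    by_cases hlen : 26*k + m = xs.length
    · rw [if_pos (by exact_mod_cast hlen)]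
      have h1 : xs.length < 26*k + 26 := by omega
      rw [if_pos h1]
      have h2 : min (r+1) (xs.length - (26*k + m)) = 0 := by omega
      rw [h2]
      simp only [Prod.mk.injEq, List.range_zero, List.map_nil, List.append_nil, and_true]
      omega
    · rw [if_neg (by intro h; exact hlen (by exact_mod_cast h))]
      have hlt : 26*k + m < xs.length := by omega
      have hget : PySem.List.pyGet? xs ((26*k + m : Nat) : Int) = some (xs[26*k + m]'hlt) := by
        rw [PySem.List.pyGet?_natCast]
        exact List.getElem?_eq_getElem hlt
      rw [hget]
      have hm1 : m + 1 = 26 - r := by omega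
      have harith2 : ((26*k + m : Nat) : Int) = ((26*k + (26 - r) : Nat) - 1 : Int) := by omega
      rw [hm1, harith2]
      rw [ih (by omega) _ (by omega)]
      refine congr_arg₂ Prod.mk rfl ?_
      · rw [List.append_assoc]
        congr 1
        have hmin : min (r+1) (xs.length - (26*k + m)) =
            (min r (xs.length - (26*k + (26 - r)))) + 1 := by omega
        rw [hmin, List.range_succ_eq_map, List.map_cons, List.map_map, List.singleton_append]
        refine List.cons_eq_cons.mpr ⟨?_, ?_⟩
        · -- head element equals pvG xs (26*k+m)
          simp only [pvG, pvCode, Nat.add_zero]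
          have hmodq : (26*k + m) % 26 = m := by omega
          have hdivq : (26*k + m) / 26 = k := by omega
          rw [hmodq, hdivq, List.getElem?_eq_getElem hlt]
          have hu : pvUppers.toList.getD m 'A' = pvUppers.toList[m]'(by simp [pvUppers]; omega) :=
            List.getD_eq_getElem _ _ _
          have hlo : pvLowersS.toList.getD k 'a' = pvLowers.getD k 'a' := by
            have h5 : pvLowersS.toList = pvLowers := by decide
            rw [h5]
          rw [hu, hlo]
        · apply List.map_congr_left
          intro t _
          simp only [Function.comp, Nat.succ_eq_add_one, pvG, pvCode]
          have hidx : 26*k + m + (t + 1) = 26*k + (26 - r) + t := by omega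
          rw [hidx]

-- outer loop from chunk k (with ii = len: immediate stop)
lemma pvOuter_at_len (xs : List String) (L : List Char) (acc : List String) :
    pvOuter xs L ((xs.length : Int)) acc = acc := by
  cases L with
  | nil => rfl
  | cons c L => simp [pvOuter]

lemma pvOuter_spec (xs : List String) :
    ∀ r : Nat, r ≤ 26 → ∀ acc : List String, 26*(26 - r) ≤ xs.length + 1 →
    pvOuter xs (List.drop (26 - r) pvLowers) ((26*(26 - r) : Nat) - 1 : Int) acc =
    acc ++ pvSpecFrom (26*(26 - r)) (List.drop (26*(26 - r)) xs) := by
  intro r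
  induction r with
  | zero =>
    intro _ acc _
    have hd : List.drop (26 - 0) pvLowers = [] := by decide
    rw [hd]
    simp only [pvOuter]
    rcases List.drop (26*(26-0)) xs with _ | ⟨y, l⟩
    · simp [pvSpecFrom]
    · norm_num [pvSpecFrom]
  | succ r ih =>
    intro hr acc hle
    set k : Nat := 26 - (r+1) with hk
    have hklt : k < 26 := by omega
    have hdropL : List.drop k pvLowers =
        pvLowers[k]'(by simp [pvLowers]; omega) :: List.drop (k+1) pvLowers := by
      exact (List.getElem_cons_drop _).symm
    rw [hdropL]
    simp only [pvOuter]
    by_cases hstop : ((26*k : Nat) - 1 : Int) = (xs.length : Int)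
    · rw [if_pos hstop]
      have hlen : xs.length + 1 = 26*k := by omega
      have : List.drop (26*k) xs = [] := List.drop_eq_nil_of_le (by omega)
      rw [this]
      simp [pvSpecFrom]
    · rw [if_neg hstop]
      have hbase : 26*k ≤ xs.length := by omega
      have hsec : pvLowers[k]'(by simp [pvLowers]; omega) = pvLowers.getD k 'a' := by
        exact (List.getD_eq_getElem _ _ _).symm
      have hstart : ((26*k : Nat) - 1 : Int) = ((26*k + (26 - 26) : Nat) - 1 : Int) := by
        norm_num
      rw [hsec, hstart, pvUpperHash_eq]
      have := pvInner_spec xs k hklt 26 (by omega) acc (by omega)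
      rw [show List.drop (26 - 26) pvUppers.toList = pvUppers.toList from by decide] at this
      rw [this]
      by_cases hcase : xs.length < 26*k + 26
      · rw [if_pos hcase]
        rw [pvOuter_at_len]
        dsimp only
        congr 1
        rw [pvSpecFrom_eq _ _ (by omega)]
        have h1 : min 26 (xs.length - (26*k + 0)) = xs.length - 26*k := by omega
        have h2 : min (List.drop (26*k) xs).length (676 - 26*k) = xs.length - 26*k := by
          rw [List.length_drop]; omega
        rw [h1, h2]
        apply List.map_congr_left
        intro t ht
        simp only [List.mem_range] at ht
        simp only [pvG]
        have : (List.drop (26*k) xs)[t]? = xs[26*k + t]? := by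
          rw [List.getElem?_drop]
        rw [this]
        congr 2
      · rw [if_neg hcase]
        dsimp only
        have hnext : ((26*k + 25 : Nat) : Int) = ((26*(26 - r) : Nat) - 1 : Int) := by
          have : 26*(26 - r) = 26*k + 26 := by omega
          rw [this]; push_cast; ring
        have hkk : k + 1 = 26 - r := by omega
        rw [hkk, hnext, ih (by omega) _ (by omega)]
        rw [List.append_assoc]
        congr 1
        -- seg(26) ++ specFrom (base+26) = specFrom base
        have hb26 : 26*(26 - r) = 26*k + 26 := by omega
        rw [hb26, pvSpecFrom_eq (List.drop (26*k + 26) xs) (26*k + 26) (by omega),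
            pvSpecFrom_eq (List.drop (26*k) xs) (26*k) (by omega)]
        have hle676 : 26*k + 26 ≤ 676 := by omega
        have h1 : min 26 (xs.length - (26*k + 0)) = 26 := by omega
        have h2 : min (List.drop (26*k) xs).length (676 - 26*k) =
            26 + min (List.drop (26*k + 26) xs).length (676 - (26*k + 26)) := by
          rw [List.length_drop, List.length_drop]; omega
        rw [h1, h2, List.range_add, List.map_append, List.map_map]
        congr 1
        · apply List.map_congr_left
          intro t ht
          simp only [List.mem_range] at ht
          simp only [pvG]
          have : (List.drop (26*k) xs)[t]? = xs[26*k + t]? := by rw [List.getElem?_drop]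
          rw [this]
          congr 2
        · apply List.map_congr_left
          intro t _
          simp only [Function.comp]
          have e1 : (List.drop (26*k) xs)[26 + t]? = xs[26*k + (26 + t)]? := by
            rw [List.getElem?_drop]
          have e2 : (List.drop (26*k + 26) xs)[t]? = xs[26*k + 26 + t]? := by
            rw [List.getElem?_drop]
          rw [e1, e2]
          have hidx : 26*k + 26 + t = 26*k + (26 + t) := by omega
          rw [hidx]

lemma pvA_eq_spec (xs : List String) : anynomize_two_symbols xs = pvSpecFrom 0 xs := by
  have h := pvOuter_spec xs 26 (le_refl _) [] (by omega)
  simp only [Nat.sub_self, Nat.mul_zero, List.drop_zero] at h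
  simpa [anynomize_two_symbols] using h

-- ===== VERDICT (by name: the statement is the Claim_ definition above) =====
theorem anynomize_two_symbols_spec : Claim_equal_anynomize_two_symbols := by
  intro xs _
  unfold Spec_anynomize_two_symbols
  rw [pvA_eq_spec, pvAlt_eq_spec]
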